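-- pv_equiv track=rewrite | github.com/mission-learning/Algorithms | Dynamic algorithms/matrix chain modifications with sum.py | sum_absolute
-- ===== SOURCE A (Python) =====
-- def absolute(a):
--     if a < 0:
--         return -a
--     return a
--
-- def sum_absolute(A):
--     tab = [[1000 for i in range (len(A))] for i in range (len(A))]
--     maxval = [[1000 for i in range (len(A))] for i in range (len(A))]
--
--     size = len(A)
--
--     for i in range (size):
--         tab[i][i] = A[i]
--         maxval[i][i] = 0
--
--     for l in range (1,size):
--         for i in range (0,size-l):
--
--             j = i + l
--
--             for m in range (i,j):
--
--                 abl = tab[i][m]+tab[m+1][j]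
--                 abla = max(absolute(abl),maxval[i][m],maxval[m+1][j])
--
--                 if maxval[i][j] > abla:
--
--                     tab[i][j] = abl
--                     maxval[i][j] = abla
--
--
--     return maxval[0][size-1]
-- ===== SOURCE B (Python) =====
-- def sum_absolute(A):
--     n = len(A)
--     memo = [[None] * n for _ in range(n)]
--
--     def solve(i, j):
--         if i == j:
--             return (A[i], 0)
--         cached = memo[i][j]
--         if cached is not None:
--             return cached
--         best = (1000, 1000)
--         for m in range(i, j):
--             tl, fl = solve(i, m)
--             tr, fr = solve(m + 1, j)
--             abl = tl + tr
--             abla = max(abs(abl), fl, fr)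
--             if best[1] > abla:
--                 best = (abl, abla)
--         memo[i][j] = best
--         return best
--
--     return solve(0, n - 1)[1]
-- ===== Notes on version B (the rewrite author's own statement) =====
-- stated objective: alternative
-- what changed: Replaced the bottom-up length-indexed DP that fills two n×n tables with three nested loops by a top-down recursive solve(i,j) memoized in an n×n table, returning the (sum, score) pair per interval.
import Mathlib
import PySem

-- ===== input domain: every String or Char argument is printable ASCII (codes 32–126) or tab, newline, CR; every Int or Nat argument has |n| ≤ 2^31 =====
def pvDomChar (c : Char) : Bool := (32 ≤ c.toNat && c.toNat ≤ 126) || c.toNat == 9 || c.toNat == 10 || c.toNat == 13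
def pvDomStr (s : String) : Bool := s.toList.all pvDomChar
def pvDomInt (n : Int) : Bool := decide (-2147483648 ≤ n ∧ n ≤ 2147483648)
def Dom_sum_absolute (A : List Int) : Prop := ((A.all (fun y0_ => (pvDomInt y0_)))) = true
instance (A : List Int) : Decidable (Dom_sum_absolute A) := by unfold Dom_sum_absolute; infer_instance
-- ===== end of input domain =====

-- B replaces A's bottom-up 2D-table DP with a memoized top-down recursion over intervals (alternative decomposition, same cost).
-- Pre_ excludes the empty list, on which A raises IndexError (maxval[0][-1] on an empty table).


-- ===== PORT A =====
-- helper `absolute` of the source module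
def pvAbsolute (a : Int) : Int := if a < 0 then -a else a

-- 2D read/write on the list-of-lists tables; all indices used are in range, so getD defaults are never read
def pvGet2 (t : List (List Int)) (i j : Nat) : Int := (t.getD i []).getD j 1000
def pvSet2 (t : List (List Int)) (i j : Nat) (v : Int) : List (List Int) :=
  t.set i ((t.getD i []).set j v)

-- literal port of A: two size×size tables of 1000s, diagonal init, length-indexed triple loop
-- (range(a,b) over the Nat indices is List.range' a (b-a), exact here since all bounds are ≥ 0)
def sum_absolute (A : List Int) : Int :=
  let size := A.length
  let tab0 := List.replicate size (List.replicate size (1000 : Int))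
  let maxval0 := List.replicate size (List.replicate size (1000 : Int))
  let st1 := (List.range size).foldl
    (fun (s : List (List Int) × List (List Int)) i =>
      (pvSet2 s.1 i i (A.getD i 0), pvSet2 s.2 i i 0)) (tab0, maxval0)
  let stF := (List.range' 1 (size - 1)).foldl
    (fun s l =>
      (List.range (size - l)).foldl
        (fun s i =>
          let j := i + l
          (List.range' i l).foldl
            (fun (s : List (List Int) × List (List Int)) m =>
              let abl := pvGet2 s.1 i m + pvGet2 s.1 (m+1) j
              let abla := max (pvAbsolute abl) (max (pvGet2 s.2 i m) (pvGet2 s.2 (m+1) j))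
              if pvGet2 s.2 i j > abla then (pvSet2 s.1 i j abl, pvSet2 s.2 i j abla)
              else s) s) s) st1
  pvGet2 stF.2 0 (size - 1)

-- ===== PORT B =====
-- literal port of B: solve(i,j) memoized in an n×n table of None entries; the for-m loop is a
-- fold threading (best, memo); the fuel argument (≥ j - i at every call) is only a totality guard
def pvMGet (t : List (List (Option (Int × Int)))) (i j : Nat) : Option (Int × Int) :=
  (t.getD i []).getD j none
def pvMSet (t : List (List (Option (Int × Int)))) (i j : Nat) (v : Int × Int) :
    List (List (Option (Int × Int))) :=
  t.set i ((t.getD i []).set j (some v))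

def solveB (A : List Int) :
    Nat → Nat → Nat → List (List (Option (Int × Int))) →
    (Int × Int) × List (List (Option (Int × Int)))
  | 0, i, _, memo => ((A.getD i 0, 0), memo)
  | fuel+1, i, j, memo =>
    if i = j then ((A.getD i 0, 0), memo)
    else
      match pvMGet memo i j with
      | some v => (v, memo)
      | none =>
        let r := (List.range' i (j - i)).foldl
          (fun (st : (Int × Int) × List (List (Option (Int × Int)))) m =>
            let lr := solveB A fuel i m st.2
            let rr := solveB A fuel (m+1) j lr.2
            let abl := lr.1.1 + rr.1.1
            let abla := max |abl| (max lr.1.2 rr.1.2)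
            (if st.1.2 > abla then (abl, abla) else st.1, rr.2))
          ((1000, 1000), memo)
        (r.1, pvMSet r.2 i j r.1)

def sum_absolute_alt (A : List Int) : Int :=
  (solveB A (A.length - 1) 0 (A.length - 1)
    (List.replicate A.length (List.replicate A.length (none : Option (Int × Int))))).1.2

-- ===== PRECONDITION & SPEC =====
-- Pre_ excludes only the empty list: there A raises IndexError (maxval[0][-1] on an empty table).
def Pre_sum_absolute (A : List Int) : Prop := A ≠ []
instance (A : List Int) : Decidable (Pre_sum_absolute A) := by unfold Pre_sum_absolute; infer_instance
def pvWitness_sum_absolute : List Int := [1, -2, 3]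

def Spec_sum_absolute (A : List Int) (out : Int) : Prop := out = sum_absolute_alt A
instance (A : List Int) (out : Int) : Decidable (Spec_sum_absolute A out) := by unfold Spec_sum_absolute; infer_instance

-- ===== CLAIM (what is proved, stated in full; the proofs are below) =====
def Claim_equal_sum_absolute : Prop := ∀ (A : List Int), Dom_sum_absolute A → Pre_sum_absolute A → Spec_sum_absolute A (sum_absolute A)

-- ===== LEMMAS AND PROOFS =====

-- `absolute` is Int.abs
theorem pvAbsolute_eq_abs (a : Int) : pvAbsolute a = |a| := by
  unfold pvAbsolute
  split_ifs with h
  · rw [abs_of_neg h]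
  · rw [abs_of_nonneg (by omega)]

-- pure model: pvG A fuel i j = the (sum, score) pair of interval [i,j], for any fuel ≥ j - i
def pvG (A : List Int) : Nat → Nat → Nat → Int × Int
  | 0, i, _ => (A.getD i 0, 0)
  | fuel+1, i, j =>
    if i = j then (A.getD i 0, 0)
    else (List.range' i (j - i)).foldl
      (fun best m =>
        let l := pvG A fuel i m
        let r := pvG A fuel (m+1) j
        let abl := l.1 + r.1
        let abla := max |abl| (max l.2 r.2)
        if best.2 > abla then (abl, abla) else best) (1000, 1000)

-- one pure step of the interval fold, with exact fuels
def pvStepP (A : List Int) (i j : Nat) (best : Int × Int) (m : Nat) : Int × Int :=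
  let l := pvG A (m - i) i m
  let r := pvG A (j - (m+1)) (m+1) j
  let abl := l.1 + r.1
  let abla := max |abl| (max l.2 r.2)
  if best.2 > abla then (abl, abla) else best

-- fuel irrelevance
theorem pvG_fuel (A : List Int) (n : Nat) : ∀ i j fuel, i ≤ j → j - i = n → n ≤ fuel →
    pvG A fuel i j = pvG A n i j := by
  induction n using Nat.strong_induction_on with
  | _ n ih =>
    intro i j fuel hij hn hf
    match n, hf with
    | 0, _ =>
      have : i = j := by omega
      subst this
      cases fuel <;> simp [pvG]
    | (k+1), _ =>
      obtain ⟨f, rfl⟩ : ∃ f, fuel = f + 1 := ⟨fuel - 1, by omega⟩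
      have hne : i ≠ j := by omega
      simp only [pvG, if_neg hne]
      refine PySem.List.foldl_congr_mem _ _ _ _ ?_
      intro acc m hm
      have hm' : i ≤ m ∧ m < j := by
        have := List.mem_range'_1.mp hm; omega
      have h1 : pvG A f i m = pvG A (m - i) i m :=
        ih (m - i) (by omega) i m f (by omega) rfl (by omega)
      have h2 : pvG A k i m = pvG A (m - i) i m :=
        ih (m - i) (by omega) i m k (by omega) rfl (by omega)
      have h3 : pvG A f (m+1) j = pvG A (j - (m+1)) (m+1) j :=
        ih (j - (m+1)) (by omega) (m+1) j f (by omega) rfl (by omega)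
      have h4 : pvG A k (m+1) j = pvG A (j - (m+1)) (m+1) j :=
        ih (j - (m+1)) (by omega) (m+1) j k (by omega) rfl (by omega)
      simp only [h1, h2, h3, h4]

-- the interval value is the pure fold of pvStepP
theorem pvG_eq_foldl (A : List Int) (i j : Nat) (h : i < j) :
    pvG A (j - i) i j = (List.range' i (j - i)).foldl (pvStepP A i j) (1000, 1000) := by
  obtain ⟨k, hk⟩ : ∃ k, j - i = k + 1 := ⟨j - i - 1, by omega⟩
  rw [hk]
  have hne : i ≠ j := by omega
  simp only [pvG, if_neg hne, hk]
  refine PySem.List.foldl_congr_mem _ _ _ _ ?_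
  intro acc m hm
  have hm' : i ≤ m ∧ m < j := by
    have := List.mem_range'_1.mp hm; omega
  have h2 : pvG A k i m = pvG A (m - i) i m :=
    pvG_fuel A (m - i) i m k (by omega) rfl (by omega)
  have h4 : pvG A k (m+1) j = pvG A (j - (m+1)) (m+1) j :=
    pvG_fuel A (j - (m+1)) (m+1) j k (by omega) rfl (by omega)
  simp only [pvStepP, h2, h4]

-- ---------- B side: the memo is coherent and solveB computes pvG ----------

def pvCoh (A : List Int) (memo : List (List (Option (Int × Int)))) : Prop :=
  ∀ i j v, pvMGet memo i j = some v → v = pvG A (j - i) i j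

-- what a read can see after a write (no shape hypotheses needed)
theorem pvMGet_pvMSet (t : List (List (Option (Int × Int)))) (i j : Nat) (v : Int × Int)
    (i' j' : Nat) (w : Int × Int) (h : pvMGet (pvMSet t i j v) i' j' = some w) :
    (i' = i ∧ j' = j ∧ w = v) ∨ pvMGet t i' j' = some w := by
  by_cases hii : i = i'
  · subst hii
    by_cases hit : i < t.length
    · have hrow : (pvMSet t i j v).getD i [] = (t.getD i []).set j (some v) := by
        simp [pvMSet, List.getD_eq_getElem?_getD, hit]
      unfold pvMGet at h
      rw [hrow] at h
      by_cases hjj : j = j'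
      · subst hjj
        rw [List.getD_eq_getElem?_getD, List.getElem?_set, if_pos rfl] at h
        by_cases hjr : j < (t.getD i []).length
        · rw [if_pos hjr] at h
          cases h
          exact Or.inl ⟨rfl, rfl, rfl⟩
        · rw [if_neg hjr] at h
          cases h
      · rw [List.getD_eq_getElem?_getD, List.getElem?_set, if_neg hjj,
            ← List.getD_eq_getElem?_getD] at h
        exact Or.inr h
    · have hrow : pvMSet t i j v = t := by
        unfold pvMSet
        exact List.set_eq_of_length_le (by omega)
      rw [hrow] at h
      exact Or.inr h
  · have hrow : (pvMSet t i j v).getD i' [] = t.getD i' [] := by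
      simp [pvMSet, List.getD_eq_getElem?_getD, hii]
    unfold pvMGet at h
    rw [hrow] at h
    exact Or.inr h

theorem pvMGet_replicate (A : List Int) (i j : Nat) :
    pvMGet (List.replicate A.length
      (List.replicate A.length (none : Option (Int × Int)))) i j = none := by
  unfold pvMGet
  have hrow : (List.replicate A.length
      (List.replicate A.length (none : Option (Int × Int)))).getD i [] =
      if i < A.length then List.replicate A.length (none : Option (Int × Int)) else [] := by
    rw [List.getD_eq_getElem?_getD, List.getElem?_replicate]
    split_ifs <;> rfl
  rw [hrow]
  split_ifs
  · rw [List.getD_eq_getElem?_getD, List.getElem?_replicate]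
    split_ifs <;> rfl
  · rfl

theorem solveB_fold_spec (A : List Int) (fuel i j : Nat) (hf : j - i ≤ fuel + 1)
    (IH : ∀ i' j' memo, i' ≤ j' → j' - i' ≤ fuel → pvCoh A memo →
      (solveB A fuel i' j' memo).1 = pvG A (j' - i') i' j' ∧
      pvCoh A (solveB A fuel i' j' memo).2) :
    ∀ ms : List Nat, (∀ m ∈ ms, i ≤ m ∧ m < j) →
    ∀ st : (Int × Int) × List (List (Option (Int × Int))), pvCoh A st.2 →
    (ms.foldl (fun (st : (Int × Int) × List (List (Option (Int × Int)))) m =>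
        let lr := solveB A fuel i m st.2
        let rr := solveB A fuel (m+1) j lr.2
        let abl := lr.1.1 + rr.1.1
        let abla := max |abl| (max lr.1.2 rr.1.2)
        (if st.1.2 > abla then (abl, abla) else st.1, rr.2)) st).1 =
      ms.foldl (pvStepP A i j) st.1 ∧
    pvCoh A (ms.foldl (fun (st : (Int × Int) × List (List (Option (Int × Int)))) m =>
        let lr := solveB A fuel i m st.2
        let rr := solveB A fuel (m+1) j lr.2
        let abl := lr.1.1 + rr.1.1
        let abla := max |abl| (max lr.1.2 rr.1.2)
        (if st.1.2 > abla then (abl, abla) else st.1, rr.2)) st).2 := by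
  intro ms
  induction ms with
  | nil => intro _ st h; exact ⟨rfl, h⟩
  | cons m ms ihms =>
    intro hmem st hcoh
    have hm := hmem m (List.mem_cons_self ..)
    obtain ⟨hl1, hl2⟩ := IH i m st.2 (by omega) (by omega) hcoh
    obtain ⟨hr1, hr2⟩ := IH (m+1) j _ (by omega) (by omega) hl2
    simp only [List.foldl_cons]
    set x := solveB A fuel i m st.2 with hx
    set y := solveB A fuel (m+1) j x.2 with hy
    have hmem' : ∀ z ∈ ms, i ≤ z ∧ z < j := fun z hz => hmem z (List.mem_cons_of_mem _ hz)
    have happ := ihms hmem'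
      (if st.1.2 > max |x.1.1 + y.1.1| (max x.1.2 y.1.2) then
         (x.1.1 + y.1.1, max |x.1.1 + y.1.1| (max x.1.2 y.1.2)) else st.1, y.2) hr2
    refine ⟨?_, happ.2⟩
    rw [happ.1]
    congr 1
    simp only [pvStepP, hl1, hr1]

theorem solveB_spec (A : List Int) : ∀ fuel i j memo, i ≤ j → j - i ≤ fuel → pvCoh A memo →
    (solveB A fuel i j memo).1 = pvG A (j - i) i j ∧ pvCoh A (solveB A fuel i j memo).2 := by
  intro fuel
  induction fuel with
  | zero =>
    intro i j memo hij hf hcoh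
    have : i = j := by omega
    subst this
    have h0 : i - i = 0 := by omega
    rw [h0]
    exact ⟨by simp [solveB, pvG], hcoh⟩
  | succ fuel ih =>
    intro i j memo hij hf hcoh
    by_cases hij' : i = j
    · subst hij'
      have h0 : i - i = 0 := by omega
      rw [h0]
      exact ⟨by simp [solveB, pvG], by simp [solveB]; exact hcoh⟩
    · have hlt : i < j := by omega
      simp only [solveB, if_neg hij']
      cases hget : pvMGet memo i j with
      | some v =>
        have hv := hcoh i j v hget
        exact ⟨by simpa using hv, hcoh⟩
      | none =>
        have hmem : ∀ m ∈ List.range' i (j - i), i ≤ m ∧ m < j := by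
          intro m hm
          have := List.mem_range'_1.mp hm
          omega
        obtain ⟨hg1, hg2⟩ := solveB_fold_spec A fuel i j (by omega) ih
          (List.range' i (j - i)) hmem ((1000, 1000), memo) hcoh
        have hval : ((List.range' i (j - i)).foldl
            (fun (st : (Int × Int) × List (List (Option (Int × Int)))) m =>
              let lr := solveB A fuel i m st.2
              let rr := solveB A fuel (m+1) j lr.2
              let abl := lr.1.1 + rr.1.1
              let abla := max |abl| (max lr.1.2 rr.1.2)
              (if st.1.2 > abla then (abl, abla) else st.1, rr.2))
            ((1000, 1000), memo)).1 = pvG A (j - i) i j := by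
          rw [hg1, pvG_eq_foldl A i j hlt]
        refine ⟨hval, ?_⟩
        intro i' j' w hw
        rcases pvMGet_pvMSet _ i j _ i' j' w hw with ⟨rfl, rfl, rfl⟩ | hold
        · exact hval
        · exact hg2 i' j' w hold

-- ---------- A side: table invariants ----------

-- intended table contents after all lengths < L have been processed
-- intended table contents after all lengths < L have been processed
def pvTabSpec (A : List Int) (L i j : Nat) : Int :=
  if i ≤ j ∧ j - i < L then (pvG A (j - i) i j).1 else 1000
def pvMaxSpec (A : List Int) (L i j : Nat) : Int :=
  if i ≤ j ∧ j - i < L then (pvG A (j - i) i j).2 else 1000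

def pvShape (A : List Int) (t : List (List Int)) : Prop :=
  t.length = A.length ∧ ∀ k, k < A.length → (t.getD k []).length = A.length

theorem rowget_eq (t : List (List Int)) (i j : Nat) (v : Int) (hit : i < t.length) :
    (pvSet2 t i j v).getD i [] = (t.getD i []).set j v := by
  simp [pvSet2, List.getD_eq_getElem?_getD, hit]

theorem rowget_ne (t : List (List Int)) (i j i' : Nat) (v : Int) (hii : i ≠ i') :
    (pvSet2 t i j v).getD i' [] = t.getD i' [] := by
  simp [pvSet2, List.getD_eq_getElem?_getD, hii]

theorem pvShape_set2 (A : List Int) (t : List (List Int)) (i j : Nat) (v : Int)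
    (ht : pvShape A t) : pvShape A (pvSet2 t i j v) := by
  obtain ⟨hlen, hrow⟩ := ht
  refine ⟨by simp [pvSet2, hlen], ?_⟩
  intro k hk
  by_cases hik : i = k
  · subst hik
    rw [rowget_eq t i j v (by omega), List.length_set]
    exact hrow i hk
  · rw [rowget_ne t i j k v hik]
    exact hrow k hk

theorem pvGet2_set2 (A : List Int) (t : List (List Int)) (ht : pvShape A t)
    (i j i' j' : Nat) (hi : i < A.length) (hj : j < A.length) (v : Int) :
    pvGet2 (pvSet2 t i j v) i' j' = if i = i' ∧ j = j' then v else pvGet2 t i' j' := by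
  obtain ⟨hlen, hrow⟩ := ht
  have hit : i < t.length := by omega
  have hjr : j < (t.getD i []).length := by rw [hrow i hi]; exact hj
  by_cases hii : i = i'
  · subst hii
    by_cases hjj : j = j'
    · subst hjj
      rw [if_pos ⟨rfl, rfl⟩]
      unfold pvGet2
      rw [rowget_eq t i j v hit]
      rw [List.getD_eq_getElem?_getD, List.getElem?_set, if_pos rfl, if_pos hjr]
      rfl
    · rw [if_neg (by tauto)]
      unfold pvGet2
      rw [rowget_eq t i j v hit]
      rw [List.getD_eq_getElem?_getD, List.getElem?_set, if_neg hjj, ← List.getD_eq_getElem?_getD]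
  · rw [if_neg (by tauto)]
    unfold pvGet2
    rw [rowget_ne t i j i' v hii]

theorem pvGet2_replicate (A : List Int) (i j : Nat) :
    pvGet2 (List.replicate A.length (List.replicate A.length (1000 : Int))) i j = 1000 := by
  unfold pvGet2
  have hrow : (List.replicate A.length (List.replicate A.length (1000 : Int))).getD i [] =
      if i < A.length then List.replicate A.length (1000 : Int) else [] := by
    rw [List.getD_eq_getElem?_getD, List.getElem?_replicate]
    split_ifs <;> rfl
  rw [hrow]
  split_ifs
  · rw [List.getD_eq_getElem?_getD, List.getElem?_replicate]
    split_ifs <;> rfl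
  · rfl

theorem pvShape_replicate (A : List Int) :
    pvShape A (List.replicate A.length (List.replicate A.length (1000 : Int))) := by
  refine ⟨by simp, ?_⟩
  intro k hk
  rw [List.getD_eq_getElem?_getD, List.getElem?_replicate, if_pos hk]
  simp

def pvInv (A : List Int) (L : Nat) (s : List (List Int) × List (List Int)) : Prop :=
  pvShape A s.1 ∧ pvShape A s.2 ∧
  ∀ i j, i < A.length → j < A.length →
    pvGet2 s.1 i j = pvTabSpec A L i j ∧ pvGet2 s.2 i j = pvMaxSpec A L i j

theorem init_aux (A : List Int) : ∀ t, t ≤ A.length →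
    pvShape A ((List.range t).foldl
      (fun (s : List (List Int) × List (List Int)) i =>
        (pvSet2 s.1 i i (A.getD i 0), pvSet2 s.2 i i 0))
      (List.replicate A.length (List.replicate A.length (1000 : Int)),
       List.replicate A.length (List.replicate A.length (1000 : Int)))).1 ∧
    pvShape A ((List.range t).foldl
      (fun (s : List (List Int) × List (List Int)) i =>
        (pvSet2 s.1 i i (A.getD i 0), pvSet2 s.2 i i 0))
      (List.replicate A.length (List.replicate A.length (1000 : Int)),
       List.replicate A.length (List.replicate A.length (1000 : Int)))).2 ∧
    ∀ i j, i < A.length → j < A.length →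
      pvGet2 ((List.range t).foldl
        (fun (s : List (List Int) × List (List Int)) i =>
          (pvSet2 s.1 i i (A.getD i 0), pvSet2 s.2 i i 0))
        (List.replicate A.length (List.replicate A.length (1000 : Int)),
         List.replicate A.length (List.replicate A.length (1000 : Int)))).1 i j =
        (if i = j ∧ i < t then A.getD i 0 else 1000) ∧
      pvGet2 ((List.range t).foldl
        (fun (s : List (List Int) × List (List Int)) i =>
          (pvSet2 s.1 i i (A.getD i 0), pvSet2 s.2 i i 0))
        (List.replicate A.length (List.replicate A.length (1000 : Int)),
         List.replicate A.length (List.replicate A.length (1000 : Int)))).2 i j =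
        (if i = j ∧ i < t then 0 else 1000) := by
  intro t
  induction t with
  | zero =>
    intro _
    refine ⟨pvShape_replicate A, pvShape_replicate A, ?_⟩
    intro i j hi hj
    simp [pvGet2_replicate]
  | succ t iht =>
    intro ht
    obtain ⟨hsh1, hsh2, hval⟩ := iht (by omega)
    rw [List.range_succ, List.foldl_append, List.foldl_cons, List.foldl_nil]
    refine ⟨pvShape_set2 A _ t t _ hsh1, pvShape_set2 A _ t t _ hsh2, ?_⟩
    intro i j hi hj
    obtain ⟨hv1, hv2⟩ := hval i j hi hj
    rw [pvGet2_set2 A _ hsh1 t t i j (by omega) (by omega) _,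
        pvGet2_set2 A _ hsh2 t t i j (by omega) (by omega) _, hv1, hv2]
    by_cases h1 : t = i ∧ t = j
    · obtain ⟨rfl, rfl⟩ := h1
      constructor <;> (split_ifs <;> first | rfl | (exfalso; omega))
    · rw [if_neg h1, if_neg h1]
      constructor <;> (split_ifs <;> first | rfl | (exfalso; omega))

theorem init_spec (A : List Int) :
    pvInv A 1 ((List.range A.length).foldl
      (fun (s : List (List Int) × List (List Int)) i =>
        (pvSet2 s.1 i i (A.getD i 0), pvSet2 s.2 i i 0))
      (List.replicate A.length (List.replicate A.length (1000 : Int)),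
       List.replicate A.length (List.replicate A.length (1000 : Int)))) := by
  obtain ⟨hsh1, hsh2, hval⟩ := init_aux A A.length (le_refl _)
  refine ⟨hsh1, hsh2, ?_⟩
  intro i j hi hj
  obtain ⟨hv1, hv2⟩ := hval i j hi hj
  rw [hv1, hv2]
  unfold pvTabSpec pvMaxSpec
  by_cases hij : i = j
  · subst hij
    have h0 : i - i = 0 := by omega
    rw [h0]
    rw [if_pos (⟨rfl, hi⟩ : i = i ∧ i < A.length), if_pos (⟨rfl, hi⟩ : i = i ∧ i < A.length)]
    rw [if_pos (⟨by omega, by omega⟩ : i ≤ i ∧ 0 < 1),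
        if_pos (⟨by omega, by omega⟩ : i ≤ i ∧ 0 < 1)]
    exact ⟨by simp [pvG], by simp [pvG]⟩
  · constructor <;> (split_ifs <;> first | rfl | (exfalso; omega))

-- the inner m-loop step of A, as a named function (definitionally the port's lambda)
def pvIStep (i j : Nat) (s : List (List Int) × List (List Int)) (m : Nat) :
    List (List Int) × List (List Int) :=
  let abl := pvGet2 s.1 i m + pvGet2 s.1 (m+1) j
  let abla := max (pvAbsolute abl) (max (pvGet2 s.2 i m) (pvGet2 s.2 (m+1) j))
  if pvGet2 s.2 i j > abla then (pvSet2 s.1 i j abl, pvSet2 s.2 i j abla) else s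

theorem inner_spec (A : List Int) (l i : Nat) (hl : 1 ≤ l) (hil : i + l < A.length)
    (s : List (List Int) × List (List Int))
    (hs1 : pvShape A s.1) (hs2 : pvShape A s.2)
    (hread : ∀ i' j', i' ≤ j' → j' < A.length → j' - i' < l →
      pvGet2 s.1 i' j' = (pvG A (j' - i') i' j').1 ∧
      pvGet2 s.2 i' j' = (pvG A (j' - i') i' j').2)
    (hcur1 : pvGet2 s.1 i (i+l) = 1000) (hcur2 : pvGet2 s.2 i (i+l) = 1000) :
    ∀ t, t ≤ l →
    pvShape A ((List.range' i t).foldl (pvIStep i (i+l)) s).1 ∧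
    pvShape A ((List.range' i t).foldl (pvIStep i (i+l)) s).2 ∧
    (∀ i' j', ¬(i = i' ∧ i + l = j') →
      pvGet2 ((List.range' i t).foldl (pvIStep i (i+l)) s).1 i' j' = pvGet2 s.1 i' j' ∧
      pvGet2 ((List.range' i t).foldl (pvIStep i (i+l)) s).2 i' j' = pvGet2 s.2 i' j') ∧
    pvGet2 ((List.range' i t).foldl (pvIStep i (i+l)) s).1 i (i+l) =
      ((List.range' i t).foldl (pvStepP A i (i+l)) (1000, 1000)).1 ∧
    pvGet2 ((List.range' i t).foldl (pvIStep i (i+l)) s).2 i (i+l) =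
      ((List.range' i t).foldl (pvStepP A i (i+l)) (1000, 1000)).2 := by
  intro t
  induction t with
  | zero =>
    intro _
    exact ⟨hs1, hs2, fun _ _ _ => ⟨rfl, rfl⟩, hcur1, hcur2⟩
  | succ t iht =>
    intro ht
    obtain ⟨ih1, ih2, ihun, ihc1, ihc2⟩ := iht (by omega)
    have hconc : List.range' i (t+1) = List.range' i t ++ [i + t] := by
      have := List.range'_concat (s := i) (n := t) (step := 1)
      simpa using this
    rw [hconc, List.foldl_append, List.foldl_cons, List.foldl_nil,
        List.foldl_append, List.foldl_cons, List.foldl_nil]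
    set r := (List.range' i t).foldl (pvIStep i (i+l)) s with hr
    set b := (List.range' i t).foldl (pvStepP A i (i+l)) (1000, 1000) with hb
    have hm : i + t < i + l := by omega
    -- the values read by the step
    have hr1m : pvGet2 r.1 i (i+t) = (pvG A t i (i+t)).1 := by
      rw [(ihun i (i+t) (by omega)).1]
      have := (hread i (i+t) (by omega) (by omega) (by omega)).1
      simpa using this
    have hr2m : pvGet2 r.2 i (i+t) = (pvG A t i (i+t)).2 := by
      rw [(ihun i (i+t) (by omega)).2]
      have := (hread i (i+t) (by omega) (by omega) (by omega)).2
      simpa using this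
    have hr1m' : pvGet2 r.1 (i+t+1) (i+l) = (pvG A (l - (t+1)) (i+t+1) (i+l)).1 := by
      rw [(ihun (i+t+1) (i+l) (by omega)).1]
      have := (hread (i+t+1) (i+l) (by omega) (by omega) (by omega)).1
      have he : (i+l) - (i+t+1) = l - (t+1) := by omega
      rwa [he] at this
    have hr2m' : pvGet2 r.2 (i+t+1) (i+l) = (pvG A (l - (t+1)) (i+t+1) (i+l)).2 := by
      rw [(ihun (i+t+1) (i+l) (by omega)).2]
      have := (hread (i+t+1) (i+l) (by omega) (by omega) (by omega)).2
      have he : (i+l) - (i+t+1) = l - (t+1) := by omega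
      rwa [he] at this
    -- the pure step values
    have hstep : pvStepP A i (i+l) b (i+t) =
        (if b.2 > max |(pvG A t i (i+t)).1 + (pvG A (l-(t+1)) (i+t+1) (i+l)).1|
            (max (pvG A t i (i+t)).2 (pvG A (l-(t+1)) (i+t+1) (i+l)).2)
         then ((pvG A t i (i+t)).1 + (pvG A (l-(t+1)) (i+t+1) (i+l)).1,
            max |(pvG A t i (i+t)).1 + (pvG A (l-(t+1)) (i+t+1) (i+l)).1|
              (max (pvG A t i (i+t)).2 (pvG A (l-(t+1)) (i+t+1) (i+l)).2))
         else b) := by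
      have h1 : (i+t) - i = t := by omega
      have h2 : (i+l) - (i+t+1) = l - (t+1) := by omega
      simp only [pvStepP, h1, h2]
    have histep : pvIStep i (i+l) r (i+t) =
        (if b.2 > max |(pvG A t i (i+t)).1 + (pvG A (l-(t+1)) (i+t+1) (i+l)).1|
            (max (pvG A t i (i+t)).2 (pvG A (l-(t+1)) (i+t+1) (i+l)).2)
         then (pvSet2 r.1 i (i+l) ((pvG A t i (i+t)).1 + (pvG A (l-(t+1)) (i+t+1) (i+l)).1),
               pvSet2 r.2 i (i+l) (max |(pvG A t i (i+t)).1 + (pvG A (l-(t+1)) (i+t+1) (i+l)).1|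
                 (max (pvG A t i (i+t)).2 (pvG A (l-(t+1)) (i+t+1) (i+l)).2)))
         else r) := by
      simp only [pvIStep, hr1m, hr2m, hr1m', hr2m', ihc2, pvAbsolute_eq_abs]
    rw [histep, hstep]
    split_ifs with hcond
    · refine ⟨pvShape_set2 A _ _ _ _ ih1, pvShape_set2 A _ _ _ _ ih2, ?_, ?_, ?_⟩
      · intro i' j' hne
        obtain ⟨u1, u2⟩ := ihun i' j' hne
        constructor
        · rw [pvGet2_set2 A _ ih1 i (i+l) i' j' (by omega) (by omega) _, if_neg hne, u1]
        · rw [pvGet2_set2 A _ ih2 i (i+l) i' j' (by omega) (by omega) _, if_neg hne, u2]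
      · rw [pvGet2_set2 A _ ih1 i (i+l) i (i+l) (by omega) (by omega) _, if_pos ⟨rfl, rfl⟩]
      · rw [pvGet2_set2 A _ ih2 i (i+l) i (i+l) (by omega) (by omega) _, if_pos ⟨rfl, rfl⟩]
    · exact ⟨ih1, ih2, ihun, ihc1, ihc2⟩

theorem mid_spec (A : List Int) (l : Nat) (hl : 1 ≤ l) (hllen : l < A.length)
    (s : List (List Int) × List (List Int)) (hs : pvInv A l s) :
    pvInv A (l+1) ((List.range (A.length - l)).foldl
      (fun s i => (List.range' i l).foldl (pvIStep i (i+l)) s) s) := by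
  obtain ⟨hs1, hs2, hval⟩ := hs
  -- strengthened: induction over the processed prefix
  suffices h : ∀ t, t ≤ A.length - l →
      pvShape A (((List.range t).foldl (fun s i => (List.range' i l).foldl (pvIStep i (i+l)) s) s)).1 ∧
      pvShape A (((List.range t).foldl (fun s i => (List.range' i l).foldl (pvIStep i (i+l)) s) s)).2 ∧
      ∀ i j, i < A.length → j < A.length →
        pvGet2 (((List.range t).foldl (fun s i => (List.range' i l).foldl (pvIStep i (i+l)) s) s)).1 i j =
          (if j = i + l ∧ i < t then (pvG A (j - i) i j).1 else pvTabSpec A l i j) ∧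
        pvGet2 (((List.range t).foldl (fun s i => (List.range' i l).foldl (pvIStep i (i+l)) s) s)).2 i j =
          (if j = i + l ∧ i < t then (pvG A (j - i) i j).2 else pvMaxSpec A l i j) by
    obtain ⟨h1, h2, h3⟩ := h (A.length - l) (le_refl _)
    refine ⟨h1, h2, ?_⟩
    intro i j hi hj
    obtain ⟨g1, g2⟩ := h3 i j hi hj
    rw [g1, g2]
    unfold pvTabSpec pvMaxSpec
    constructor <;> (split_ifs <;> first | rfl | (exfalso; omega))
  intro t
  induction t with
  | zero =>
    intro _
    refine ⟨hs1, hs2, ?_⟩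
    intro i j hi hj
    obtain ⟨v1, v2⟩ := hval i j hi hj
    rw [List.range_zero, List.foldl_nil, v1, v2]
    constructor <;> rw [if_neg (by omega)]
  | succ t iht =>
    intro ht
    obtain ⟨ih1, ih2, ihval⟩ := iht (by omega)
    rw [List.range_succ, List.foldl_append, List.foldl_cons, List.foldl_nil]
    set r := (List.range t).foldl (fun s i => (List.range' i l).foldl (pvIStep i (i+l)) s) s with hrdef
    have htl : t + l < A.length := by omega
    have hread : ∀ i' j', i' ≤ j' → j' < A.length → j' - i' < l →
        pvGet2 r.1 i' j' = (pvG A (j' - i') i' j').1 ∧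
        pvGet2 r.2 i' j' = (pvG A (j' - i') i' j').2 := by
      intro i' j' h1 h2 h3
      obtain ⟨g1, g2⟩ := ihval i' j' (by omega) h2
      rw [g1, g2]
      rw [if_neg (by omega), if_neg (by omega)]
      unfold pvTabSpec pvMaxSpec
      rw [if_pos ⟨h1, h3⟩, if_pos ⟨h1, h3⟩]
      exact ⟨rfl, rfl⟩
    have hcur : pvGet2 r.1 t (t+l) = 1000 ∧ pvGet2 r.2 t (t+l) = 1000 := by
      obtain ⟨g1, g2⟩ := ihval t (t+l) (by omega) htl
      rw [g1, g2, if_neg (by omega), if_neg (by omega)]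
      unfold pvTabSpec pvMaxSpec
      rw [if_neg (by omega), if_neg (by omega)]
      exact ⟨rfl, rfl⟩
    obtain ⟨f1, f2, fun_, fc1, fc2⟩ :=
      inner_spec A l t hl htl r ih1 ih2 hread hcur.1 hcur.2 l (le_refl _)
    refine ⟨f1, f2, ?_⟩
    intro i j hi hj
    by_cases hij : i = t ∧ j = t + l
    · obtain ⟨rfl, rfl⟩ := hij
      have hfold : (List.range' i l).foldl (pvStepP A i (i+l)) (1000, 1000) =
          pvG A l i (i+l) := by
        have := pvG_eq_foldl A i (i+l) (by omega)
        have he : (i+l) - i = l := by omega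
        rw [he] at this
        exact this.symm
      rw [fc1, fc2, hfold]
      have he : (i+l) - i = l := by omega
      rw [if_pos ⟨rfl, by omega⟩, if_pos ⟨rfl, by omega⟩, he]
      exact ⟨rfl, rfl⟩
    · have hne : ¬(t = i ∧ t + l = j) := by tauto
      obtain ⟨u1, u2⟩ := fun_ i j hne
      obtain ⟨g1, g2⟩ := ihval i j hi hj
      rw [u1, u2, g1, g2]
      constructor <;> (split_ifs <;> first | rfl | (exfalso; omega))

theorem outer_spec (A : List Int) :
    ∀ t s, 1 + t ≤ A.length → pvInv A 1 s →
    pvInv A (1 + t) ((List.range' 1 t).foldl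
      (fun s l => (List.range (A.length - l)).foldl
        (fun s i => (List.range' i l).foldl (pvIStep i (i+l)) s) s) s) := by
  intro t
  induction t with
  | zero =>
    intro s _ hs
    simpa using hs
  | succ t iht =>
    intro s ht hs
    have hconc : List.range' 1 (t+1) = List.range' 1 t ++ [1 + t] := by
      have := List.range'_concat (s := 1) (n := t) (step := 1)
      simpa using this
    rw [hconc, List.foldl_append, List.foldl_cons, List.foldl_nil]
    have hmid := mid_spec A (1+t) (by omega) (by omega) _ (iht s (by omega) hs)
    have he : 1 + t + 1 = 1 + (t + 1) := by omega
    rw [← he]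
    exact hmid

-- ===== VERDICT (by name: the statement is the Claim_ definition above) =====
theorem sum_absolute_spec : Claim_equal_sum_absolute := by
  intro A _ hpre
  unfold Spec_sum_absolute
  have hlen : 1 ≤ A.length := by
    cases A with
    | nil => exact absurd rfl hpre
    | cons a as => simp
  -- B side
  have hcohe : pvCoh A (List.replicate A.length
      (List.replicate A.length (none : Option (Int × Int)))) := by
    intro i j v hv
    rw [pvMGet_replicate] at hv
    cases hv
  have hB : sum_absolute_alt A = (pvG A (A.length - 1) 0 (A.length - 1)).2 := by
    unfold sum_absolute_alt
    rw [(solveB_spec A (A.length - 1) 0 (A.length - 1) _ (by omega) (by omega) hcohe).1]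
    simp
  -- A side
  have hA : sum_absolute A = (pvG A (A.length - 1) 0 (A.length - 1)).2 := by
    show pvGet2 ((List.range' 1 (A.length - 1)).foldl
      (fun s l => (List.range (A.length - l)).foldl
        (fun s i => (List.range' i l).foldl (pvIStep i (i+l)) s) s)
      ((List.range A.length).foldl
        (fun (s : List (List Int) × List (List Int)) i =>
          (pvSet2 s.1 i i (A.getD i 0), pvSet2 s.2 i i 0))
        (List.replicate A.length (List.replicate A.length (1000 : Int)),
         List.replicate A.length (List.replicate A.length (1000 : Int))))).2 0 (A.length - 1) =
      (pvG A (A.length - 1) 0 (A.length - 1)).2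
    have hinv := outer_spec A (A.length - 1)
      ((List.range A.length).foldl
        (fun (s : List (List Int) × List (List Int)) i =>
          (pvSet2 s.1 i i (A.getD i 0), pvSet2 s.2 i i 0))
        (List.replicate A.length (List.replicate A.length (1000 : Int)),
         List.replicate A.length (List.replicate A.length (1000 : Int))))
      (by omega) (init_spec A)
    obtain ⟨-, -, hval⟩ := hinv
    have hv := (hval 0 (A.length - 1) (by omega) (by omega)).2
    have he : 1 + (A.length - 1) = A.length := by omega
    rw [he] at hv
    rw [hv]
    unfold pvMaxSpec
    rw [if_pos ⟨by omega, by omega⟩]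
    simp
  rw [hA, hB]
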